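-- pv_equiv track=rewrite | github.com/yuu246/Atcoder_ABC | practice/tenkei100/3.py | ACGT
-- ===== SOURCE A (Python) =====
-- def ACGT(s):
--     length = len(s)
--     for i in range(length):
--         if s[i] == 'A' or s[i] == 'C' or s[i] == 'G' or s[i] == 'T':
--             pass
--         else:
--             return 0
--     return length
-- ===== SOURCE B (Python) =====
-- def ACGT(s):
--     total = s.count('A') + s.count('C') + s.count('G') + s.count('T')
--     return len(s) if total == len(s) else 0
-- ===== Notes on version B (the rewrite author's own statement) =====
-- stated objective: alternative
-- what changed: Replaces the index loop with early return by four whole-string count passes and a single length comparison.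
import Mathlib
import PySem

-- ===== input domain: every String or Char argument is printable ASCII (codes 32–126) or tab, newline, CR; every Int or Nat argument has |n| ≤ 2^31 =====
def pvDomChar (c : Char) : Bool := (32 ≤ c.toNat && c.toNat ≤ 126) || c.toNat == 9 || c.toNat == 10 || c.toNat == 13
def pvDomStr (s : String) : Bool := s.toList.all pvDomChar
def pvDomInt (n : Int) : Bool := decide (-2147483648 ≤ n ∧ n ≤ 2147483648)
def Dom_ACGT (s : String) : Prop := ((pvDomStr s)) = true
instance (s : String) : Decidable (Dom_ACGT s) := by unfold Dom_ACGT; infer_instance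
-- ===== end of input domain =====

-- B replaces A's early-returning index loop by four whole-string count passes and one length comparison (alternative decomposition, same return value).

-- ===== PORT A =====
-- the 'for i in range(length)' loop visits s[0], s[1], … in order; early 'return 0' = base of this recursion
def ACGT.loop (cs : List Char) (length : Int) : Int :=
  match cs with
  | [] => length
  | c :: rest =>
      if c = 'A' ∨ c = 'C' ∨ c = 'G' ∨ c = 'T' then ACGT.loop rest length
      else 0

def ACGT (s : String) : Int :=
  let length : Int := (s.toList.length : Int)
  ACGT.loop s.toList length

-- ===== PORT B =====
def ACGT_alt (s : String) : Int :=
  let cs := s.toList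
  let total : Int := (cs.count 'A' : Int) + (cs.count 'C' : Int) + (cs.count 'G' : Int) + (cs.count 'T' : Int)
  if total = (cs.length : Int) then (cs.length : Int) else 0

-- ===== PRECONDITION & SPEC =====
def Spec_ACGT (s : String) (out : Int) : Prop := out = ACGT_alt s
instance (s : String) (out : Int) : Decidable (Spec_ACGT s out) := by unfold Spec_ACGT; infer_instance

-- ===== CLAIM (what is proved, stated in full; the proofs are below) =====
def Claim_equal_ACGT : Prop := ∀ (s : String), Dom_ACGT s → Spec_ACGT s (ACGT s)

-- ===== LEMMAS AND PROOFS =====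

def pvValid (c : Char) : Bool := c = 'A' ∨ c = 'C' ∨ c = 'G' ∨ c = 'T'

theorem pvLoop_char (cs : List Char) (length : Int) :
    ACGT.loop cs length = if cs.all pvValid then length else 0 := by
  induction cs with
  | nil => simp [ACGT.loop]
  | cons c rest ih =>
      by_cases h : c = 'A' ∨ c = 'C' ∨ c = 'G' ∨ c = 'T'
      · simp [ACGT.loop, h, ih, pvValid]
      · simp [ACGT.loop, h, pvValid]

theorem pvCount_sum (cs : List Char) :
    (cs.count 'A' : Int) + (cs.count 'C' : Int) + (cs.count 'G' : Int) + (cs.count 'T' : Int)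
      = (cs.countP pvValid : Int) := by
  induction cs with
  | nil => simp
  | cons c rest ih =>
      by_cases h : c = 'A' ∨ c = 'C' ∨ c = 'G' ∨ c = 'T'
      · rcases h with h | h | h | h <;> subst h <;>
          simp [pvValid] <;> omega
      · push Not at h
        obtain ⟨h1, h2, h3, h4⟩ := h
        simp [pvValid, h1, h2, h3, h4]
        omega

theorem pvCountP_eq_length_iff (cs : List Char) :
    ((cs.countP pvValid : Int) = (cs.length : Int)) ↔ cs.all pvValid = true := by
  rw [List.all_eq_true]
  constructor
  · intro h
    have : cs.countP pvValid = cs.length := by exact_mod_cast h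
    intro x hx
    exact (List.countP_eq_length.mp this) x hx
  · intro h
    have : cs.countP pvValid = cs.length := List.countP_eq_length.mpr h
    exact_mod_cast this

-- ===== VERDICT (by name: the statement is the Claim_ definition above) =====
theorem ACGT_spec : Claim_equal_ACGT := by
  intro s _
  unfold Spec_ACGT ACGT ACGT_alt
  rw [pvLoop_char]
  simp only [pvCount_sum]
  by_cases h : s.toList.all pvValid = true
  · simp [h, (pvCountP_eq_length_iff s.toList).mpr h]
  · have h3 : List.countP pvValid s.toList ≠ s.length := by
      intro hc
      have hl : s.toList.length = s.length := by simp
      have hc2 : List.countP pvValid s.toList = s.toList.length := by rw [hl]; exact hc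
      exact h (by simpa [List.all_eq_true] using List.countP_eq_length.mp hc2)
    simp [h, h3]
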